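-- pv_equiv track=rewrite | github.com/archlinux/aurweb | aurweb/git/update.py | extract_arch_fields
-- ===== SOURCE A (Python) =====
-- def extract_arch_fields(pkginfo, field):
--     values = []
--
--     if field in pkginfo:
--         for val in pkginfo[field]:
--             values.append({"value": val, "arch": None})
--
--     for arch in pkginfo["arch"]:
--         if field + "_" + arch in pkginfo:
--             for val in pkginfo[field + "_" + arch]:
--                 values.append({"value": val, "arch": arch})
--
--     return values
-- ===== SOURCE B (Python) =====
-- def extract_arch_fields(pkginfo, field):
--     # Different algorithm: one scan over pkginfo.items() with string prefix
--     # matching fills per-arch buckets (and the generic entries); output is then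
--     # emitted from the buckets in [generic] + arch-list order.  A instead does
--     # a membership test + lookup per arch.
--     archs = pkginfo["arch"]
--     prefix = field + "_"
--     buckets = {arch: [] for arch in archs}
--     generic = []
--     for key, vals in pkginfo.items():
--         if key == field:
--             generic = [{"value": v, "arch": None} for v in vals]
--         else:
--             arch = key[len(prefix):]
--             if key.startswith(prefix) and arch in buckets:
--                 buckets[arch] = [{"value": v, "arch": arch} for v in vals]
--     out = generic
--     for arch in archs:
--         out = out + buckets[arch]
--     return out
-- ===== Notes on version B (the rewrite author's own statement) =====
-- stated objective: alternative
-- what changed: Instead of A's per-arch membership tests and lookups, B makes one scan over pkginfo.items(), classifying each key by string prefix matching into per-arch buckets (plus the generic list), and then emits the buckets in generic-then-arch-list order.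
import Mathlib
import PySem

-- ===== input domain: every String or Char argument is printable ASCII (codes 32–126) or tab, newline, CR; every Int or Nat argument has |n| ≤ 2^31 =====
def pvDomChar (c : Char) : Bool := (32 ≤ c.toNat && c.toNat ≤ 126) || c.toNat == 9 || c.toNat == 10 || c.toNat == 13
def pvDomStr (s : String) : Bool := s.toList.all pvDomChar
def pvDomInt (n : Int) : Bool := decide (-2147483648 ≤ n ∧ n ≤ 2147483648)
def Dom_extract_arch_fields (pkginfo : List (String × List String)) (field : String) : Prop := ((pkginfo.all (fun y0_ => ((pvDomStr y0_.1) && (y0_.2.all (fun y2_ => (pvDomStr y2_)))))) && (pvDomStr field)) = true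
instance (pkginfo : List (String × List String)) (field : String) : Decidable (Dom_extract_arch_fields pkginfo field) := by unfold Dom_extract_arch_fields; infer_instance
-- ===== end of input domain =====

-- B replaces A's per-arch dict lookups by ONE scan over pkginfo's items that classifies each
-- key by string-prefix matching into per-arch buckets, emitted afterwards in A's order
-- (alternative algorithm, same cost).

-- the dict entry {"value": v, "arch": a} both programs build
def pvEntry (a : Option String) (v : String) : List (String × Option String) :=
  [("value", some v), ("arch", a)]

-- shared dict primitive: Python dict lookup on the association list (first match)
def pvGetKey? (d : List (String × List String)) (k : String) : Option (List String) :=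
  match d with
  | [] => none
  | (k', v) :: rest => if k' == k then some v else pvGetKey? rest k

-- ===== PORT A =====
def extract_arch_fields (pkginfo : List (String × List String)) (field : String) : List (List (String × Option String)) :=
  -- if field in pkginfo: for val in pkginfo[field]: values.append(...)
  let values : List (List (String × Option String)) :=
    match pvGetKey? pkginfo field with
    | some vals => vals.foldl (fun acc val => acc ++ [pvEntry none val]) []
    | none => []
  -- for arch in pkginfo["arch"]: if field + "_" + arch in pkginfo: for val in ...: append
  ((pvGetKey? pkginfo "arch").getD []).foldl (fun acc arch =>
    match pvGetKey? pkginfo (field ++ "_" ++ arch) with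
    | some vals => vals.foldl (fun a val => a ++ [pvEntry (some arch) val]) acc
    | none => acc) values

-- ===== PORT B =====
-- the body of B's one scan over pkginfo.items(): state = (generic, buckets)
-- arch = key[len(prefix):]  (prefix = field + "_")
def pvArchOf (field k : String) : String :=
  PySem.Str.slice k (some (PySem.Str.len (field ++ "_"))) none

def pvStepB (field : String)
    (st : List (List (String × Option String)) × PySem.Dict String (List (List (String × Option String))))
    (kv : String × List String) :
    List (List (String × Option String)) × PySem.Dict String (List (List (String × Option String))) :=
  if kv.1 == field then
    (kv.2.map (pvEntry none), st.2)
  else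
    -- if key.startswith(prefix) and arch in buckets: buckets[arch] = [...]
    if PySem.Str.startswith kv.1 (field ++ "_") && st.2.contains (pvArchOf field kv.1) then
      (st.1, st.2.insert (pvArchOf field kv.1) (kv.2.map (pvEntry (some (pvArchOf field kv.1)))))
    else st

def extract_arch_fields_alt (pkginfo : List (String × List String)) (field : String) : List (List (String × Option String)) :=
  -- archs = pkginfo["arch"]  (Pre_ guarantees the key is present; Python raises KeyError otherwise)
  let archs := (pvGetKey? pkginfo "arch").getD []
  -- buckets = {arch: [] for arch in archs}
  let buckets0 : PySem.Dict String (List (List (String × Option String))) :=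
    archs.foldl (fun d a => d.insert a []) PySem.Dict.empty
  -- the scan over pkginfo.items()
  let st := pkginfo.foldl (pvStepB field) ([], buckets0)
  -- out = generic; for arch in archs: out = out + buckets[arch]
  archs.foldl (fun out a => out ++ st.2.getD a []) st.1

-- ===== PRECONDITION & SPEC =====
-- Pre_: (1) the key "arch" must be present, else Python A (and B) raise KeyError at pkginfo["arch"];
-- (2) the keys are pairwise distinct — this restricts only the association-list MODEL of the dict:
-- a Python dict cannot hold duplicate keys, so no Python input is excluded by it.
def Pre_extract_arch_fields (pkginfo : List (String × List String)) (_field : String) : Prop :=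
  "arch" ∈ pkginfo.map Prod.fst ∧ (pkginfo.map Prod.fst).Nodup
instance (pkginfo : List (String × List String)) (field : String) : Decidable (Pre_extract_arch_fields pkginfo field) := by unfold Pre_extract_arch_fields; infer_instance

def pvWitness_extract_arch_fields : (List (String × List String)) × String :=
  ([("arch", ["x86_64"]), ("depends", ["glibc"]), ("depends_x86_64", ["gcc"])], "depends")

def Spec_extract_arch_fields (pkginfo : List (String × List String)) (field : String) (out : List (List (String × Option String))) : Prop := out = extract_arch_fields_alt pkginfo field
instance (pkginfo : List (String × List String)) (field : String) (out : List (List (String × Option String))) : Decidable (Spec_extract_arch_fields pkginfo field out) := by unfold Spec_extract_arch_fields; infer_instance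

-- ===== CLAIM (what is proved, stated in full; the proofs are below) =====
def Claim_equal_extract_arch_fields : Prop := ∀ (pkginfo : List (String × List String)) (field : String), Dom_extract_arch_fields pkginfo field → Pre_extract_arch_fields pkginfo field → Spec_extract_arch_fields pkginfo field (extract_arch_fields pkginfo field)

-- ===== LEMMAS AND PROOFS =====

-- splitting a list at a prefix: s = p ++ t iff p is a prefix and t is the rest
theorem pv_eq_append_iff {α : Type} (s p t : List α) :
    s = p ++ t ↔ p <+: s ∧ s.drop p.length = t := by
  constructor
  · rintro rfl; exact ⟨List.prefix_append p t, by simp⟩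
  · rintro ⟨⟨u, rfl⟩, h⟩
    simp only [List.drop_left] at h
    rw [h]

-- what key[len(prefix):] is, on the character-list side
theorem pvArchOf_toList (field k : String) :
    (pvArchOf field k).toList = k.toList.drop (field ++ "_").toList.length := by
  unfold pvArchOf
  rw [PySem.Str.toList_slice, PySem.Chars.slice_eq_listSlice]
  rw [show PySem.Str.len (field ++ "_") = (((field ++ "_").toList.length : Nat) : Int) by simp,
    PySem.List.slice_from_natCast]

-- B's prefix test recognises exactly the keys A looks up: k = field + "_" + a
theorem pv_key_iff (k field a : String) :
    k = field ++ "_" ++ a ↔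
      (PySem.Str.startswith k (field ++ "_") = true ∧ pvArchOf field k = a) := by
  rw [show (k = field ++ "_" ++ a) ↔ (k.toList = (field ++ "_" ++ a).toList) from String.ext_iff,
    show (pvArchOf field k = a) ↔ ((pvArchOf field k).toList = a.toList) from String.ext_iff,
    pvArchOf_toList, PySem.Str.startswith_eq, PySem.Chars.startswith_iff,
    show (field ++ "_" ++ a).toList = (field ++ "_").toList ++ a.toList from String.toList_append]
  exact pv_eq_append_iff k.toList (field ++ "_").toList a.toList

-- a key other than field + "_" + a leaves bucket a unchanged by one step
theorem pv_step_get_untouched (field a : String)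
    (st : List (List (String × Option String)) × PySem.Dict String (List (List (String × Option String))))
    (kv : String × List String) (h : kv.1 ≠ field ++ "_" ++ a) :
    ((pvStepB field st kv).2).get? a = st.2.get? a := by
  unfold pvStepB
  split_ifs with h1 h2
  · rfl
  · show (st.2.insert (pvArchOf field kv.1) _).get? a = st.2.get? a
    apply PySem.Dict.get?_insert_of_ne
    intro hEq
    exact h ((pv_key_iff kv.1 field a).mpr ⟨(Bool.and_eq_true _ _ ▸ h2).1, hEq.symm⟩)
  · rfl

-- one step never shrinks the bucket key set
theorem pv_step_contains (field x : String)
    (st : List (List (String × Option String)) × PySem.Dict String (List (List (String × Option String))))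
    (kv : String × List String) (h : st.2.contains x = true) :
    ((pvStepB field st kv).2).contains x = true := by
  unfold pvStepB
  split_ifs with h1 h2
  · exact h
  · show (st.2.insert (pvArchOf field kv.1) _).contains x = true
    rw [PySem.Dict.contains_insert, h]
    simp
  · exact h

-- a scan over items none of which has key field + "_" + a leaves bucket a unchanged
theorem pv_foldl_get_untouched (field a : String) (l : List (String × List String))
    (st : List (List (String × Option String)) × PySem.Dict String (List (List (String × Option String))))
    (h : ∀ kv ∈ l, kv.1 ≠ field ++ "_" ++ a) :
    ((l.foldl (pvStepB field) st).2).get? a = st.2.get? a := by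
  induction l generalizing st with
  | nil => rfl
  | cons kv t ih =>
      rw [List.foldl_cons, ih _ (fun p hp => h p (List.mem_cons_of_mem kv hp)),
        pv_step_get_untouched field a st kv (h kv (List.mem_cons_self))]

-- a scan over items none of which has key field leaves the generic entries unchanged
theorem pv_foldl_fst_untouched (field : String) (l : List (String × List String))
    (st : List (List (String × Option String)) × PySem.Dict String (List (List (String × Option String))))
    (h : ∀ kv ∈ l, kv.1 ≠ field) :
    (l.foldl (pvStepB field) st).1 = st.1 := by
  induction l generalizing st with
  | nil => rfl
  | cons kv t ih =>
      rw [List.foldl_cons, ih _ (fun p hp => h p (List.mem_cons_of_mem kv hp))]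
      unfold pvStepB
      split_ifs with h1 h2
      · exact absurd (by exact beq_iff_eq.mp h1) (h kv (List.mem_cons_self))
      · rfl
      · rfl


-- a step whose key is not field leaves the generic entries unchanged
theorem pv_step_fst (field : String)
    (st : List (List (String × Option String)) × PySem.Dict String (List (List (String × Option String))))
    (kv : String × List String) (h : kv.1 ≠ field) :
    (pvStepB field st kv).1 = st.1 := by
  unfold pvStepB
  split_ifs with h1 h2
  · exact absurd (beq_iff_eq.mp h1) h
  · rfl
  · rfl

-- one definitional step of the lookup
theorem pvGetKey?_cons (k : String) (v : List String) (rest : List (String × List String)) (x : String) :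
    pvGetKey? ((k, v) :: rest) x = if k == x then some v else pvGetKey? rest x := rfl

-- the generic entries after the whole scan (keys distinct)
theorem pv_fst_spec (field : String) (l : List (String × List String))
    (st : List (List (String × Option String)) × PySem.Dict String (List (List (String × Option String))))
    (hnd : (l.map Prod.fst).Nodup) :
    (l.foldl (pvStepB field) st).1 =
      match pvGetKey? l field with
      | some vs => vs.map (pvEntry none)
      | none => st.1 := by
  induction l generalizing st with
  | nil => rfl
  | cons kv t ih =>
      rw [List.map_cons, List.nodup_cons] at hnd
      obtain ⟨hknot, hndt⟩ := hnd
      rw [List.foldl_cons]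
      by_cases hk : kv.1 = field
      · have hstep : (pvStepB field st kv) = (kv.2.map (pvEntry none), st.2) := by
          unfold pvStepB; simp [hk]
        rw [hstep, pv_foldl_fst_untouched field t _ (fun p hp hpe => hknot (by
          rw [← hk] at hpe; exact hpe ▸ List.mem_map_of_mem hp))]
        show _ = match pvGetKey? ((kv.1, kv.2) :: t) field with
          | some vs => vs.map (pvEntry none)
          | none => st.1
        rw [pvGetKey?_cons, if_pos (beq_iff_eq.mpr hk)]
      · have hg : pvGetKey? ((kv.1, kv.2) :: t) field = pvGetKey? t field := by
          rw [pvGetKey?_cons, if_neg (by simpa using hk)]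
        rw [show (kv : String × List String) = (kv.1, kv.2) from rfl, hg, ih _ hndt, pv_step_fst field st kv hk]

-- the bucket of arch a after the whole scan (keys distinct, a already a bucket key)
theorem pv_snd_spec (field a : String) (l : List (String × List String))
    (st : List (List (String × Option String)) × PySem.Dict String (List (List (String × Option String))))
    (hnd : (l.map Prod.fst).Nodup) (hc : st.2.contains a = true) :
    ((l.foldl (pvStepB field) st).2).get? a =
      match pvGetKey? l (field ++ "_" ++ a) with
      | some vs => some (vs.map (pvEntry (some a)))
      | none => st.2.get? a := by
  induction l generalizing st with
  | nil => rfl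
  | cons kv t ih =>
      rw [List.map_cons, List.nodup_cons] at hnd
      obtain ⟨hknot, hndt⟩ := hnd
      rw [List.foldl_cons]
      by_cases hk : kv.1 = field ++ "_" ++ a
      · obtain ⟨hsw, hsl⟩ := (pv_key_iff kv.1 field a).mp hk
        have hkf : kv.1 ≠ field := by
          intro hEq
          have := congrArg (fun s => s.toList.length) (hEq.symm.trans hk)
          simp [String.toList_append] at this
        have hstep : (pvStepB field st kv)
            = (st.1, st.2.insert a (kv.2.map (pvEntry (some a)))) := by
          unfold pvStepB
          rw [if_neg (by simpa using hkf), hsl]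
          rw [if_pos (by rw [hsw, hc]; rfl)]
        rw [hstep, pv_foldl_get_untouched field a t _ (fun p hp hpe => hknot (by
          rw [← hk] at hpe; exact hpe ▸ List.mem_map_of_mem hp))]
        show _ = match pvGetKey? ((kv.1, kv.2) :: t) (field ++ "_" ++ a) with
          | some vs => some (vs.map (pvEntry (some a)))
          | none => st.2.get? a
        rw [pvGetKey?_cons, if_pos (beq_iff_eq.mpr hk)]
        exact PySem.Dict.get?_insert_self _ _ _
      · have hg : pvGetKey? ((kv.1, kv.2) :: t) (field ++ "_" ++ a) = pvGetKey? t (field ++ "_" ++ a) := by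
          rw [pvGetKey?_cons, if_neg (by simpa using hk)]
        rw [show (kv : String × List String) = (kv.1, kv.2) from rfl, hg, ih _ hndt (pv_step_contains field a st kv hc),
          pv_step_get_untouched field a st kv hk]

-- the initial bucket dict: every arch maps to []
theorem pv_buckets_get (l : List String)
    (d : PySem.Dict String (List (List (String × Option String)))) (a : String) :
    (l.foldl (fun d x => d.insert x []) d).get? a = if a ∈ l then some [] else d.get? a := by
  induction l generalizing d with
  | nil => simp
  | cons x t ih =>
      rw [List.foldl_cons, ih]
      by_cases hm : a ∈ t
      · simp [hm]
      · by_cases hx : a = x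
        · simp [hx, PySem.Dict.get?_insert_self]
        · simp [hm, hx, PySem.Dict.get?_insert_of_ne _ _ hx]

-- A's per-item branch, rewritten through the option: match = map over getD
theorem pv_match_branch {α : Type} (o : Option (List String)) (acc : List α) (f : String → α) :
    (match o with
     | some vals => vals.foldl (fun a val => a ++ [f val]) acc
     | none => acc) = acc ++ (o.getD []).map f := by
  cases o with
  | none => simp
  | some vals => simp only [Option.getD_some]; exact PySem.List.foldl_append_singleton_eq_map f vals acc

-- A's outer loop equals the flatMap over the arch list
theorem pv_outer_loop (pkginfo : List (String × List String)) (field : String)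
    (archs : List String) (acc : List (List (String × Option String))) :
    archs.foldl (fun acc arch =>
      match pvGetKey? pkginfo (field ++ "_" ++ arch) with
      | some vals => vals.foldl (fun a val => a ++ [pvEntry (some arch) val]) acc
      | none => acc) acc
    = acc ++ archs.flatMap (fun arch =>
        ((pvGetKey? pkginfo (field ++ "_" ++ arch)).getD []).map (pvEntry (some arch))) := by
  induction archs generalizing acc with
  | nil => simp
  | cons a rest ih =>
      simp only [List.foldl_cons, List.flatMap_cons]
      rw [pv_match_branch, ih, List.append_assoc]

-- flatMap respects pointwise equality on members
theorem pv_flatMap_congr {α β : Type} (l : List α) (f g : α → List β)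
    (h : ∀ a ∈ l, f a = g a) : l.flatMap f = l.flatMap g := by
  induction l with
  | nil => rfl
  | cons x t ih =>
      simp only [List.flatMap_cons]
      rw [h x List.mem_cons_self, ih (fun a ha => h a (List.mem_cons_of_mem x ha))]

-- ===== VERDICT (by name: the statement is the Claim_ definition above) =====
theorem extract_arch_fields_spec : Claim_equal_extract_arch_fields := by
  intro pkginfo field _ hpre
  obtain ⟨_, hnd⟩ := hpre
  unfold Spec_extract_arch_fields extract_arch_fields extract_arch_fields_alt
  rw [pv_outer_loop, pv_match_branch]
  rw [PySem.List.foldl_append_eq_flatMap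
    (g := fun a => ((pkginfo.foldl (pvStepB field)
      ([], ((pvGetKey? pkginfo "arch").getD []).foldl (fun d a => d.insert a []) PySem.Dict.empty)).2).getD a [])]
  have hc : ∀ a ∈ (pvGetKey? pkginfo "arch").getD [],
      (((pvGetKey? pkginfo "arch").getD []).foldl
        (fun (d : PySem.Dict String (List (List (String × Option String)))) x => d.insert x [])
        PySem.Dict.empty).contains a = true := by
    intro a ha
    rw [PySem.Dict.contains_eq_isSome_get?, pv_buckets_get, if_pos ha]
    rfl
  congr 1
  · rw [pv_fst_spec field pkginfo _ hnd]
    cases pvGetKey? pkginfo field <;> simp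
  · apply (pv_flatMap_congr _ _ _ _).symm
    intro a ha
    rw [PySem.Dict.getD_eq_get?_getD, pv_snd_spec field a pkginfo _ hnd (hc a ha)]
    cases h : pvGetKey? pkginfo (field ++ "_" ++ a) with
    | some vs => simp
    | none =>
        show ((((pvGetKey? pkginfo "arch").getD []).foldl (fun d x => d.insert x []) PySem.Dict.empty).get? a).getD [] = _
        rw [pv_buckets_get, if_pos ha]
        simp
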